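-- pv_equiv track=rewrite | github.com/princyprakash26/python_exercises | python_exercises/04_list/113_formatting.py | formatting
-- ===== SOURCE A (Python) =====
-- def formatting(lists):
--     result = []
--     for i in range(len(lists)):
--         if i == len(lists) - 1:
--             result.append(' and '.join(lists[:i+1]))  # Added spaces around 'and'
--         else:
--             result.append(', '.join(lists[:i+1]))  # Removed 'and'
--
--     return result
-- ===== SOURCE B (Python) =====
-- def formatting(lists):
--     result = []
--     acc = ''
--     for i, s in enumerate(lists):
--         acc = s if i == 0 else acc + ', ' + s
--         result.append(acc)
--     if result:
--         result[-1] = ' and '.join(lists)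
--     return result
-- ===== Notes on version B (the rewrite author's own statement) =====
-- stated objective: alternative
-- what changed: B carries a running comma-joined accumulator across the loop and patches the last slot with the single ' and ' join, instead of re-slicing and re-joining the whole prefix at every index.
import Mathlib
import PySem

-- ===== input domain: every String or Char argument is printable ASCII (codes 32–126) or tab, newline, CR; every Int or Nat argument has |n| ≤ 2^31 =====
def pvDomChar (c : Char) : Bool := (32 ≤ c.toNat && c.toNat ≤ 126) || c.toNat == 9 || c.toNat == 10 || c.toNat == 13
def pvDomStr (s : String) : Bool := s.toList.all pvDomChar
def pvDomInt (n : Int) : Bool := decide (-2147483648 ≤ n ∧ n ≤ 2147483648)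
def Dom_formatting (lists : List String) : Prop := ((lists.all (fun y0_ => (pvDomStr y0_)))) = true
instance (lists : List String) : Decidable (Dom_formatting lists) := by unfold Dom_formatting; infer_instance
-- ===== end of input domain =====

-- B replaces A's per-index slice-and-rejoin by a running accumulator string plus one final ' and ' join (alternative decomposition; return value proved equal).

-- ===== PORT A =====
def formatting (lists : List String) : List String :=
  (PySem.List.pyRange 0 (PySem.List.len lists) 1).foldl
    (fun result i =>
      if i == PySem.List.len lists - 1 then
        result ++ [PySem.Str.join " and " (PySem.List.slice lists none (some (i + 1)))]
      else
        result ++ [PySem.Str.join ", " (PySem.List.slice lists none (some (i + 1)))])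
    []

-- ===== PORT B =====
def formatting_alt (lists : List String) : List String :=
  let st := (PySem.List.enumerate lists).foldl
    (fun (st : List String × String) p =>
      let acc := if p.1 == 0 then p.2 else st.2 ++ ", " ++ p.2
      (st.1 ++ [acc], acc)) ([], "")
  let result := st.1
  if result.isEmpty then result
  else result.dropLast ++ [PySem.Str.join " and " lists]

-- ===== PRECONDITION & SPEC =====
def Spec_formatting (lists : List String) (out : List String) : Prop := out = formatting_alt lists
instance (lists : List String) (out : List String) : Decidable (Spec_formatting lists out) := by unfold Spec_formatting; infer_instance

-- ===== CLAIM (what is proved, stated in full; the proofs are below) =====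
def Claim_equal_formatting : Prop := ∀ (lists : List String), Dom_formatting lists → Spec_formatting lists (formatting lists)

-- ===== LEMMAS AND PROOFS =====

-- the list of comma-joined prefixes, the common shape of both loops
def pvPrefixes (lists : List String) : List String :=
  (List.range lists.length).map (fun j => PySem.Str.join ", " (lists.take (j + 1)))

lemma chars_join_snoc (sep s : List Char) (p : List (List Char)) (hp : p ≠ []) :
    PySem.Chars.join sep (p ++ [s]) = PySem.Chars.join sep p ++ sep ++ s := by
  induction p with
  | nil => exact absurd rfl hp
  | cons a t ih =>
    cases t with
    | nil => simp [PySem.Chars.join_cons_cons, PySem.Chars.join_singleton]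
    | cons b u =>
      have ih' := ih (by simp)
      simp only [List.cons_append] at ih' ⊢
      rw [PySem.Chars.join_cons_cons, PySem.Chars.join_cons_cons, ih']
      simp [List.append_assoc]

lemma str_join_snoc (sep s : String) (p : List String) (hp : p ≠ []) :
    PySem.Str.join sep (p ++ [s]) = PySem.Str.join sep p ++ sep ++ s := by
  apply String.toList_inj.mp
  simp only [PySem.Str.toList_join, String.toList_append, List.map_append, List.map_cons,
    List.map_nil]
  exact chars_join_snoc sep.toList s.toList (p.map String.toList) (by simpa using hp)

lemma str_join_singleton (sep s : String) : PySem.Str.join sep [s] = s := by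
  apply String.toList_inj.mp
  simp [PySem.Str.toList_join, PySem.Chars.join_singleton]

lemma foldl_ite_snoc {α β : Type} (c : α → Bool) (g₁ g₂ : α → β) (l : List α)
    (init : List β) :
    l.foldl (fun r i => if c i = true then r ++ [g₁ i] else r ++ [g₂ i]) init
      = init ++ l.map (fun i => if c i = true then g₁ i else g₂ i) := by
  induction l generalizing init with
  | nil => simp
  | cons a t ih => by_cases h : c a = true <;> simp [h, ih]

-- B's loop after the first iteration: the accumulator is the comma-join of the prefix so far
lemma B_loop (rest : List String) (k : Int) (hk : 1 ≤ k) (res : List String)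
    (p : List String) (hp : p ≠ []) :
    (PySem.List.enumerate rest k).foldl
      (fun (st : List String × String) q =>
        let acc := if q.1 == 0 then q.2 else st.2 ++ ", " ++ q.2
        (st.1 ++ [acc], acc))
      (res, PySem.Str.join ", " p)
    = (res ++ (List.range rest.length).map
          (fun j => PySem.Str.join ", " (p ++ rest.take (j + 1))),
       PySem.Str.join ", " (p ++ rest)) := by
  induction rest generalizing k res p with
  | nil => simp [PySem.List.enumerate]
  | cons s u ih =>
    have hk0 : (k == 0) = false := by simp; omega
    simp only [PySem.List.enumerate, List.foldl_cons, hk0, Bool.false_eq_true, if_false]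
    rw [← str_join_snoc ", " s p hp, ih (k + 1) (by omega) _ (p ++ [s]) (by simp)]
    simp only [Prod.mk.injEq]
    refine ⟨?_, by simp⟩
    rw [List.length_cons, List.range_succ_eq_map, List.map_cons, List.map_map]
    simp [Function.comp, List.take_succ_cons, List.append_assoc]

lemma pvPrefixes_cons (h : String) (t : List String) :
    pvPrefixes (h :: t)
      = h :: (List.range t.length).map
          (fun j => PySem.Str.join ", " ((h :: t).take (j + 2))) := by
  unfold pvPrefixes
  rw [List.length_cons, List.range_succ_eq_map, List.map_cons, List.map_map]
  simp [str_join_singleton]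

lemma B_eq (h : String) (t : List String) :
    formatting_alt (h :: t)
      = (pvPrefixes (h :: t)).dropLast ++ [PySem.Str.join " and " (h :: t)] := by
  unfold formatting_alt
  simp only [PySem.List.enumerate, List.foldl_cons]
  have h0 : ((0 : Int) == 0) = true := by decide
  simp only [h0, if_true, List.nil_append, zero_add]
  rw [show (([h], h) : List String × String)
        = ([PySem.Str.join ", " [h]], PySem.Str.join ", " [h]) by rw [str_join_singleton]]
  rw [B_loop t 1 (by norm_num) [PySem.Str.join ", " [h]] [h] (by simp)]
  have hres : [PySem.Str.join ", " [h]] ++ (List.range t.length).map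
      (fun j => PySem.Str.join ", " ([h] ++ t.take (j + 1))) = pvPrefixes (h :: t) := by
    rw [pvPrefixes_cons, str_join_singleton]
    simp [List.take_succ_cons]
  rw [hres]
  have hne : (pvPrefixes (h :: t)).isEmpty = false := by
    rw [pvPrefixes_cons]
    simp
  rw [hne]
  simp

lemma A_eq (h : String) (t : List String) :
    formatting (h :: t)
      = (pvPrefixes (h :: t)).dropLast ++ [PySem.Str.join " and " (h :: t)] := by
  unfold formatting
  have hlen : PySem.List.len (h :: t) = ((t.length + 1 : Nat) : Int) := by
    simp [PySem.List.len]
  rw [hlen, PySem.List.pyRange_one]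
  simp only [sub_zero, Int.toNat_natCast]
  rw [List.foldl_map, foldl_ite_snoc, List.nil_append]
  rw [List.range_succ, List.map_append, List.map_singleton]
  congr 1
  · -- the first t.length entries: the branch test is false, the slice is take (k+1)
    rw [show (pvPrefixes (h :: t)).dropLast
          = ((List.range t.length).map
              (fun j => PySem.Str.join ", " ((h :: t).take (j + 1)))) by
        unfold pvPrefixes
        rw [List.length_cons, List.range_succ, List.map_append]
        exact List.dropLast_concat]
    apply List.map_congr_left
    intro k hk
    rw [List.mem_range] at hk
    have hne : ((0 + (k : Int)) == ((t.length + 1 : Nat) : Int) - 1) = false := by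
      rw [beq_eq_false_iff_ne]
      push_cast
      omega
    rw [hne]
    simp only [Bool.false_eq_true, if_false]
    rw [show (0 + (k : Int)) + 1 = ((k + 1 : Nat) : Int) by push_cast; ring]
    rw [PySem.List.slice_to_natCast]
  · -- the last entry: the branch test is true, the slice is the whole list
    have heq : ((0 + (t.length : Int)) == ((t.length + 1 : Nat) : Int) - 1) = true := by
      rw [beq_iff_eq]
      push_cast
      ring
    rw [heq]
    simp only [if_true]
    rw [show (0 + (t.length : Int)) + 1 = ((t.length + 1 : Nat) : Int) by push_cast; ring]
    rw [PySem.List.slice_to_natCast]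
    rw [List.take_of_length_le (by simp)]

-- ===== VERDICT (by name: the statement is the Claim_ definition above) =====
theorem formatting_spec : Claim_equal_formatting := by
  intro lists _
  unfold Spec_formatting
  cases lists with
  | nil => decide
  | cons h t => rw [A_eq, B_eq]
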